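-- pv_equiv track=rewrite | github.com/CaptainDapper/Advent-Of-Code-2023 | Day 06/Josh/main.py | get_wins
-- ===== SOURCE A (Python) =====
-- def get_wins(time, min_distance):
--     wins = []
--
--     for i in range(time):
--         power = i
--         timeLeft = time - i
--         distance = power * timeLeft
--         if distance > min_distance:
--             wins.append((power, timeLeft, distance))
--     return wins
-- ===== SOURCE B (Python) =====
-- def get_wins(time, min_distance):
--     # Binary search the left edge of the (contiguous, symmetric) winning
--     # interval on the monotone half [0, time//2], then emit the interval
--     # directly with no per-element test.
--     if time <= 0:
--         return []
--     def win(i):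
--         return i * (time - i) > min_distance
--     half = time // 2
--     if not win(half):
--         return []
--     lo_s, hi_s = 0, half
--     while lo_s < hi_s:
--         mid = (lo_s + hi_s) // 2
--         if win(mid):
--             hi_s = mid
--         else:
--             lo_s = mid + 1
--     lo = lo_s
--     hi = min(time - lo, time - 1)
--     return [(i, time - i, i * (time - i)) for i in range(lo, hi + 1)]
-- ===== Notes on version B (the rewrite author's own statement) =====
-- stated objective: alternative
-- what changed: Instead of testing every i in range(time), B binary-searches the left edge of the contiguous winning interval on the monotone half [0, time//2] and emits the symmetric interval directly with no per-element test; the per-element test disappears but the output-sized emit keeps the overall cost comparable.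
import Mathlib
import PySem

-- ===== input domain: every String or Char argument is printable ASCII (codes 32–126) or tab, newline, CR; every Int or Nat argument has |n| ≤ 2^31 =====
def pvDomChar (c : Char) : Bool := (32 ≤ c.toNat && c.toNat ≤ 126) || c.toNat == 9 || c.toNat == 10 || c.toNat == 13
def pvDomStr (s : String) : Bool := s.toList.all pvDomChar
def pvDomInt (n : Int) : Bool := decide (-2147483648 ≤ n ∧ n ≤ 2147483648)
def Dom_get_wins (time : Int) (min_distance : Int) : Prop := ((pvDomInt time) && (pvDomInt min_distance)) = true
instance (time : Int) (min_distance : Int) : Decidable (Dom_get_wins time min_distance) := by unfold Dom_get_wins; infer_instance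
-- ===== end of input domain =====

-- B replaces A's full scan of range(time) by a binary search for the left edge of the
-- contiguous winning interval, then emits the interval with no per-element test (alternative algorithm).

-- ===== PORT A =====
def get_wins (time : Int) (min_distance : Int) : List (Int × Int × Int) :=
  (PySem.List.pyRange 0 time 1).foldl
    (fun wins i =>
      let power := i
      let timeLeft := time - i
      let distance := power * timeLeft
      if distance > min_distance then wins ++ [(power, timeLeft, distance)] else wins)
    []

-- ===== PORT B =====
-- the 'while lo_s < hi_s' loop of B; the Nat argument is fuel making the loop
-- structurally recursive ((hi-lo)+1 steps always suffice, see pvBsearch_spec)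
def pvBsearch (fuel : Nat) (time min_distance lo hi : Int) : Int :=
  match fuel with
  | 0 => lo
  | fuel + 1 =>
    if lo < hi then
      let mid := PySem.Int.floordiv (lo + hi) 2
      if mid * (time - mid) > min_distance then pvBsearch fuel time min_distance lo mid
      else pvBsearch fuel time min_distance (mid + 1) hi
    else lo

def get_wins_alt (time : Int) (min_distance : Int) : List (Int × Int × Int) :=
  if time ≤ 0 then []
  else
    let half := PySem.Int.floordiv time 2
    if ¬ (half * (time - half) > min_distance) then []
    else
      let lo := pvBsearch (half.toNat + 1) time min_distance 0 half
      let hi := min (time - lo) (time - 1)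
      (PySem.List.pyRange lo (hi + 1) 1).map (fun i => (i, time - i, i * (time - i)))

-- ===== PRECONDITION & SPEC =====
def Spec_get_wins (time : Int) (min_distance : Int) (out : List (Int × Int × Int)) : Prop := out = get_wins_alt time min_distance
instance (time : Int) (min_distance : Int) (out : List (Int × Int × Int)) : Decidable (Spec_get_wins time min_distance out) := by unfold Spec_get_wins; infer_instance

-- ===== CLAIM (what is proved, stated in full; the proofs are below) =====
def Claim_equal_get_wins : Prop := ∀ (time : Int) (min_distance : Int), Dom_get_wins time min_distance → Spec_get_wins time min_distance (get_wins time min_distance)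

-- ===== LEMMAS AND PROOFS =====

-- midpoint bounds for the while-loop below
theorem pv_mid_bounds (lo hi : Int) (h : lo < hi) :
    lo ≤ PySem.Int.floordiv (lo + hi) 2 ∧ PySem.Int.floordiv (lo + hi) 2 < hi := by
  constructor
  · rw [PySem.Int.le_floordiv_iff_mul_le (by norm_num)]; omega
  · rw [PySem.Int.floordiv_lt_iff_lt_mul (by norm_num)]; omega

-- A is the filter of the winning predicate over range(time), mapped to triples
theorem pvA_eq (time m : Int) :
    get_wins time m =
      ((PySem.List.pyRange 0 time 1).filter (fun i => decide (i * (time - i) > m))).map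
        (fun i => (i, time - i, i * (time - i))) := by
  simp [get_wins, PySem.List.foldl_append_ite]

-- monotone on the left half
theorem pvMono (time i j : Int) (_h0 : 0 ≤ i) (hij : i ≤ j) (hj : 2 * j ≤ time) :
    i * (time - i) ≤ j * (time - j) := by
  nlinarith [mul_nonneg (show (0:ℤ) ≤ j - i by omega) (show (0:ℤ) ≤ time - i - j by omega)]

-- bsearch returns the least winner of [lo, hi], given a winner at hi and enough fuel
theorem pvBsearch_spec (time m : Int) : ∀ (fuel : Nat) (lo hi : Int), lo ≤ hi →
    hi - lo < (fuel : Int) →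
    m < hi * (time - hi) →
    lo ≤ pvBsearch fuel time m lo hi ∧ pvBsearch fuel time m lo hi ≤ hi ∧
      m < (pvBsearch fuel time m lo hi) * (time - pvBsearch fuel time m lo hi) ∧
      (lo < pvBsearch fuel time m lo hi →
        ¬ m < (pvBsearch fuel time m lo hi - 1) * (time - (pvBsearch fuel time m lo hi - 1))) := by
  intro fuel
  induction fuel with
  | zero => intro lo hi _ hf _; simp at hf; omega
  | succ n ih =>
    intro lo hi hle hf hhi
    by_cases h : lo < hi
    · have hb := pv_mid_bounds lo hi h
      rw [pvBsearch]
      simp only [if_pos h]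
      by_cases hwin : PySem.Int.floordiv (lo + hi) 2 * (time - PySem.Int.floordiv (lo + hi) 2) > m
      · rw [if_pos hwin]
        have := ih lo (PySem.Int.floordiv (lo + hi) 2) (by omega) (by push_cast at hf ⊢; omega) hwin
        omega
      · rw [if_neg hwin]
        have := ih (PySem.Int.floordiv (lo + hi) 2 + 1) hi (by omega) (by push_cast at hf ⊢; omega) hhi
        rcases this with ⟨h1, h2, h3, h4⟩
        refine ⟨by omega, by omega, h3, ?_⟩
        intro _
        by_cases hc : PySem.Int.floordiv (lo + hi) 2 + 1 < pvBsearch n time m (PySem.Int.floordiv (lo + hi) 2 + 1) hi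
        · exact h4 hc
        · have he : pvBsearch n time m (PySem.Int.floordiv (lo + hi) 2 + 1) hi = PySem.Int.floordiv (lo + hi) 2 + 1 := by omega
          rw [he]; simpa using hwin
    · rw [pvBsearch]
      simp only [if_neg h]
      have : lo = hi := by omega
      subst this
      exact ⟨le_refl _, le_refl _, hhi, by omega⟩

-- if the midpoint does not win, nothing wins
theorem pvNoWin (time m : Int) (_ht : 0 < time)
    (h : ¬ PySem.Int.floordiv time 2 * (time - PySem.Int.floordiv time 2) > m) :
    ∀ i : Int, 0 ≤ i → i < time → ¬ m < i * (time - i) := by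
  set half := PySem.Int.floordiv time 2 with hh
  have hb : half * 2 ≤ time ∧ time < (half + 1) * 2 :=
    (PySem.Int.floordiv_eq_iff_of_pos (by norm_num)).1 hh.symm
  intro i h0 hlt hwin
  by_cases hc : 2 * i ≤ time
  · have := pvMono time i half h0 (by omega) (by omega)
    omega
  · have h0' : (0:ℤ) ≤ time - i := by omega
    have := pvMono time (time - i) half h0' (by omega) (by omega)
    have hsym : i * (time - i) = (time - i) * (time - (time - i)) := by ring
    omega

-- filter of an interval predicate over range(0, time) is the interval range
theorem pvFilter_interval (time m lo hi : Int) (h0 : 0 ≤ lo) (hlh : lo ≤ hi) (hht : hi < time)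
    (hiff : ∀ i : Int, 0 ≤ i → i < time → (m < i * (time - i) ↔ lo ≤ i ∧ i ≤ hi)) :
    (PySem.List.pyRange 0 time 1).filter (fun i => decide (i * (time - i) > m)) =
      PySem.List.pyRange lo (hi + 1) 1 := by
  have hsplit1 : PySem.List.pyRange 0 time 1 =
      PySem.List.pyRange 0 lo 1 ++ PySem.List.pyRange lo time 1 :=
    PySem.List.pyRange_one_append 0 lo time h0 (by omega)
  have hsplit2 : PySem.List.pyRange lo time 1 =
      PySem.List.pyRange lo (hi + 1) 1 ++ PySem.List.pyRange (hi + 1) time 1 :=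
    PySem.List.pyRange_one_append lo (hi + 1) time (by omega) (by omega)
  rw [hsplit1, hsplit2, List.filter_append, List.filter_append]
  have e1 : (PySem.List.pyRange 0 lo 1).filter (fun i => decide (i * (time - i) > m)) = [] := by
    rw [List.filter_eq_nil_iff]
    intro a ha
    rw [PySem.List.mem_pyRange_one] at ha
    simp only [gt_iff_lt, decide_eq_true_eq]
    have := hiff a (by omega) (by omega)
    omega
  have e2 : (PySem.List.pyRange (hi + 1) time 1).filter (fun i => decide (i * (time - i) > m)) = [] := by
    rw [List.filter_eq_nil_iff]
    intro a ha
    rw [PySem.List.mem_pyRange_one] at ha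
    simp only [gt_iff_lt, decide_eq_true_eq]
    have := hiff a (by omega) (by omega)
    omega
  have e3 : (PySem.List.pyRange lo (hi + 1) 1).filter (fun i => decide (i * (time - i) > m)) =
      PySem.List.pyRange lo (hi + 1) 1 := by
    rw [List.filter_eq_self]
    intro a ha
    rw [PySem.List.mem_pyRange_one] at ha
    simp only [gt_iff_lt, decide_eq_true_eq]
    have := hiff a (by omega) (by omega)
    omega
  rw [e1, e2, e3, List.append_nil, List.nil_append]

-- ===== VERDICT (by name: the statement is the Claim_ definition above) =====
theorem get_wins_spec : Claim_equal_get_wins := by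
  intro time m _
  unfold Spec_get_wins
  rw [pvA_eq]
  unfold get_wins_alt
  by_cases ht : time ≤ 0
  · rw [if_pos ht, PySem.List.pyRange_one_eq_nil (by omega)]
    simp
  · rw [if_neg ht]
    rw [not_le] at ht
    set half := PySem.Int.floordiv time 2 with hh
    have hb : half * 2 ≤ time ∧ time < (half + 1) * 2 :=
      (PySem.Int.floordiv_eq_iff_of_pos (by norm_num)).1 hh.symm
    by_cases hw : half * (time - half) > m
    · rw [if_neg (by simpa using hw)]
      set r := pvBsearch (half.toNat + 1) time m 0 half with hr
      obtain ⟨hr0, hrh, hrwin, hrmin⟩ := pvBsearch_spec time m (half.toNat + 1) 0 half (by omega)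
        (by push_cast; omega) hw
      rw [← hr] at hr0 hrh hrwin hrmin
      -- minimality on [0, r)
      have hmin : ∀ i : Int, 0 ≤ i → i < r → ¬ m < i * (time - i) := by
        intro i h0 hir hwin
        have hr1 : 0 < r := by omega
        have hnot := hrmin hr1
        have := pvMono time i (r - 1) h0 (by omega) (by omega)
        omega
      set hi := min (time - r) (time - 1) with hhi
      have hiff : ∀ i : Int, 0 ≤ i → i < time → (m < i * (time - i) ↔ r ≤ i ∧ i ≤ hi) := by
        intro i h0 hit
        constructor
        · intro hwin
          refine ⟨?_, ?_⟩
          · by_contra hc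
            exact hmin i h0 (by omega) hwin
          · by_contra hc
            rw [not_le] at hc
            have hti0 : (0:ℤ) ≤ time - i := by omega
            have hti : time - i < r := by omega
            have hsym : i * (time - i) = (time - i) * (time - (time - i)) := by ring
            exact hmin (time - i) hti0 hti (by omega)
        · rintro ⟨h1, h2⟩
          -- r ≤ i ≤ hi ≤ time - r, so (i - r) * (time - i - r) ≥ 0
          have h2' : i ≤ time - r := by omega
          nlinarith [mul_nonneg (show (0:ℤ) ≤ i - r by omega) (show (0:ℤ) ≤ time - i - r by omega)]
      rw [pvFilter_interval time m r hi hr0 (by omega) (by omega) hiff]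
    · rw [if_pos (by simpa using hw)]
      rw [List.map_eq_nil_iff, List.filter_eq_nil_iff]
      intro a ha
      rw [PySem.List.mem_pyRange_one] at ha
      simp only [gt_iff_lt, decide_eq_true_eq]
      exact pvNoWin time m ht hw a (by omega) (by omega)
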